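-- pv_equiv track=rewrite | github.com/Caume/HerraduraKEx | SecurityProofsCode/hkex_nl_verification.py | nl_fscx_inv_iter
-- ===== SOURCE A (Python) =====
-- N    = 32
--
-- def rol(x, r, n=N):
--     r %= n; m = (1 << n) - 1
--     return ((x << r) | (x >> (n - r))) & m
--
-- def ror(x, r, n=N):
--     return rol(x, n - r, n)
--
-- def fscx(A, B, n=N):
--     return A ^ B ^ rol(A, 1, n) ^ rol(B, 1, n) ^ ror(A, 1, n) ^ ror(B, 1, n)
--
-- def fscx_revolve(X, B, r, n=N):
--     for _ in range(r):
--         X = fscx(X, B, n)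
--     return X
--
-- def M_inv(X, n=N):
--     """M^{-1}(X) = M^{n/2-1}(X)  (FSCX period: M^{n/2} = I)"""
--     return fscx_revolve(X, 0, n // 2 - 1, n)
--
-- def nl_fscx_inv_iter(Y, B, max_iter=64, n=N):
--     mask = (1 << n) - 1
--     A = B ^ M_inv(Y, n)
--     for i in range(1, max_iter + 1):
--         carry = rol((A + B) & mask, n >> 2, n)
--         A_new = B ^ M_inv(Y ^ carry, n)
--         if A_new == A:
--             return A, i
--         A = A_new
--     return A, -1
-- ===== SOURCE B (Python) =====
-- # B: M_inv recomputed as direct self-mix rounds (X -> X ^ rotl(X,1) ^ rotl(X,n-1), the fscx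
-- # specialisation at B=0), and the blind fixed-point loop replaced by an orbit-memoizing one:
-- # every visited state is recorded and on the first repeated state the state after max_iter
-- # steps is read off the recorded orbit by cycle-length modular arithmetic.
-- N = 32
--
-- def rotl(x, k, n=N):
--     k %= n
--     m = (1 << n) - 1
--     return ((x << k) | (x >> (n - k))) & m
--
-- def M_inv(X, n=N):
--     # n//2 - 1 rounds of the self-mix (fscx with B = 0 inlined)
--     for _ in range(n // 2 - 1):
--         X = X ^ rotl(X, 1, n) ^ rotl(X, n - 1, n)
--     return X
--
-- def nl_fscx_inv_iter(Y, B, max_iter=64, n=N):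
--     mask = (1 << n) - 1
--     A = B ^ M_inv(Y, n)
--     trace = [A]            # trace[t] = state after t update steps
--     pos = {A: 0}
--     i = 1
--     while i <= max_iter:
--         A_new = B ^ M_inv(Y ^ rotl((A + B) & mask, n >> 2, n), n)
--         if A_new == A:
--             return A, i
--         j = pos.get(A_new)
--         if j is not None:
--             L = i - j      # cycle of length >= 2: no fixed point can ever occur
--             return trace[j + (max_iter - j) % L], -1
--         pos[A_new] = i
--         trace.append(A_new)
--         A = A_new
--         i += 1
--     return A, -1
-- ===== Notes on version B (the rewrite author's own statement) =====
-- stated objective: alternative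
-- what changed: M_inv is recomputed as direct rounds of the self-mix X -> X ^ rotl(X,1) ^ rotl(X,n-1) (the fscx specialisation at B=0, dropping fscx/ror/fscx_revolve), and the blind run-to-max_iter fixed-point loop is replaced by an orbit-memoizing iteration: every visited state is recorded with its index, and on the first repeated state the loop stops and reads the state after max_iter steps off the recorded orbit by cycle-length modular arithmetic instead of iterating on.
import Mathlib
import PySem

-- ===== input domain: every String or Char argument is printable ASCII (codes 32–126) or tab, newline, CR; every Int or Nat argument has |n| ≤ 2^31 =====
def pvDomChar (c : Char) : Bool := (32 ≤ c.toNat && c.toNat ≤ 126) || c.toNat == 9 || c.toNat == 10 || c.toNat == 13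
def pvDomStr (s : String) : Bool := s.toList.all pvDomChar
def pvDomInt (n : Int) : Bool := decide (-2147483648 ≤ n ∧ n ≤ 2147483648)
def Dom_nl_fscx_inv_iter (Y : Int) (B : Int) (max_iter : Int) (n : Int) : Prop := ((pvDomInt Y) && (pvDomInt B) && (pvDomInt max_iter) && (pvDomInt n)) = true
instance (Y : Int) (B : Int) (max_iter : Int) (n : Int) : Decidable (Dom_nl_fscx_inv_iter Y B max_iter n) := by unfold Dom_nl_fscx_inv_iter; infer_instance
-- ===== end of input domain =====

-- B recomputes M_inv as direct self-mix rounds (the fscx specialisation at B = 0) and replaces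
-- A's blind fixed-point loop by an orbit-memoizing one that, on the first repeated state, reads
-- the state after max_iter steps off the recorded orbit by cycle-length modular arithmetic
-- (alternative decomposition; equal return values).

-- ===== PORT A =====
def pvRol (x r n : Int) : Int :=
  let r := PySem.Int.mod r n
  let m : Int := (1 <<< n.toNat) - 1
  PySem.Int.band (PySem.Int.bor (x <<< r.toNat) (x >>> (n - r).toNat)) m

def pvRor (x r n : Int) : Int := pvRol x (n - r) n

def pvFscx (A B n : Int) : Int :=
  PySem.Int.bxor (PySem.Int.bxor (PySem.Int.bxor (PySem.Int.bxor (PySem.Int.bxor A B)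
    (pvRol A 1 n)) (pvRol B 1 n)) (pvRor A 1 n)) (pvRor B 1 n)

def pvRevolveAux (B n : Int) : Nat → Int → Int
  | 0, X => X
  | k+1, X => pvRevolveAux B n k (pvFscx X B n)

def pvRevolve (X B r n : Int) : Int := pvRevolveAux B n r.toNat X

def pvMinv (X n : Int) : Int := pvRevolve X 0 (PySem.Int.floordiv n 2 - 1) n

def pvALoop (Y B n mask : Int) : Nat → Int → Int → Int × Int
  | 0, A, _ => (A, -1)
  | k+1, A, i =>
    let carry := pvRol (PySem.Int.band (A + B) mask) (n >>> 2) n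
    let A_new := PySem.Int.bxor B (pvMinv (PySem.Int.bxor Y carry) n)
    if A_new = A then (A, i) else pvALoop Y B n mask k A_new (i + 1)

def nl_fscx_inv_iter (Y : Int) (B : Int) (max_iter : Int) (n : Int) : Int × Int :=
  let mask : Int := (1 <<< n.toNat) - 1
  let A := PySem.Int.bxor B (pvMinv Y n)
  pvALoop Y B n mask max_iter.toNat A 1

-- ===== PORT B =====
def pvRotl (x k n : Int) : Int :=
  let k := PySem.Int.mod k n
  let m : Int := (1 <<< n.toNat) - 1
  PySem.Int.band (PySem.Int.bor (x <<< k.toNat) (x >>> (n - k).toNat)) m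

def pvMixInv (X n : Int) : Int :=
  (List.range (PySem.Int.floordiv n 2 - 1).toNat).foldl
    (fun X _ => PySem.Int.bxor (PySem.Int.bxor X (pvRotl X 1 n)) (pvRotl X (n - 1) n)) X

def pvBLoop (Y B n mask max_iter : Int) :
    Nat → Int → Int → PySem.Dict Int Int → List Int → Int × Int
  | 0, A, _, _, _ => (A, -1)
  | k+1, A, i, pos, trace =>
    let A_new := PySem.Int.bxor B
      (pvMixInv (PySem.Int.bxor Y (pvRotl (PySem.Int.band (A + B) mask) (n >>> 2) n)) n)
    if A_new = A then (A, i)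
    else
      match pos.get? A_new with
      | some j =>
        let L := i - j
        ((PySem.List.pyGet? trace (j + PySem.Int.mod (max_iter - j) L)).getD 0, -1)
      | none =>
        pvBLoop Y B n mask max_iter k A_new (i + 1) (pos.insert A_new i) (trace ++ [A_new])

def nl_fscx_inv_iter_alt (Y : Int) (B : Int) (max_iter : Int) (n : Int) : Int × Int :=
  let mask : Int := (1 <<< n.toNat) - 1
  let A := PySem.Int.bxor B (pvMixInv Y n)
  pvBLoop Y B n mask max_iter max_iter.toNat A 1 (PySem.Dict.empty.insert A 0) [A]

-- ===== PRECONDITION & SPEC =====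
-- Pre_ excludes exactly the inputs where the Python A raises: n < 0 (ValueError on 1 << n) and
-- n = 0 with at least one loop iteration (ZeroDivisionError in rol's r %= n).
def Pre_nl_fscx_inv_iter (Y : Int) (B : Int) (max_iter : Int) (n : Int) : Prop :=
  1 ≤ n ∨ (n = 0 ∧ max_iter < 1)
instance (Y : Int) (B : Int) (max_iter : Int) (n : Int) : Decidable (Pre_nl_fscx_inv_iter Y B max_iter n) := by unfold Pre_nl_fscx_inv_iter; infer_instance

def pvWitness_nl_fscx_inv_iter : Int × Int × Int × Int := (5, 7, 64, 8)

def Spec_nl_fscx_inv_iter (Y : Int) (B : Int) (max_iter : Int) (n : Int) (out : Int × Int) : Prop := out = nl_fscx_inv_iter_alt Y B max_iter n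
instance (Y : Int) (B : Int) (max_iter : Int) (n : Int) (out : Int × Int) : Decidable (Spec_nl_fscx_inv_iter Y B max_iter n out) := by unfold Spec_nl_fscx_inv_iter; infer_instance

-- ===== CLAIM (what is proved, stated in full; the proofs are below) =====
def Claim_equal_nl_fscx_inv_iter : Prop := ∀ (Y : Int) (B : Int) (max_iter : Int) (n : Int), Dom_nl_fscx_inv_iter Y B max_iter n → Pre_nl_fscx_inv_iter Y B max_iter n → Spec_nl_fscx_inv_iter Y B max_iter n (nl_fscx_inv_iter Y B max_iter n)

-- ===== LEMMAS AND PROOFS =====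

-- bridges between B's helpers and A's: the rotations coincide, the self-mix is fscx at B = 0,
-- and the foldl of the self-mix is the fscx_revolve-based M_inv
lemma pvRotl_eq (x k n : Int) : pvRotl x k n = pvRol x k n := rfl

lemma pvRol_zero (r n : Int) : pvRol 0 r n = 0 := by
  unfold pvRol
  simp only [Int.zero_shiftLeft, Int.zero_shiftRight, PySem.Int.bor_zero]
  rw [PySem.Int.band_comm, PySem.Int.band_zero]

lemma mix_eq_fscx (X n : Int) :
    PySem.Int.bxor (PySem.Int.bxor X (pvRotl X 1 n)) (pvRotl X (n - 1) n) = pvFscx X 0 n := by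
  simp [pvFscx, pvRor, pvRotl_eq, pvRol_zero]

lemma revolveAux_succ (B n : Int) (k : Nat) (X : Int) :
    pvRevolveAux B n (k+1) X = pvFscx (pvRevolveAux B n k X) B n := by
  induction k generalizing X with
  | zero => rfl
  | succ k ih => simp only [pvRevolveAux]; rw [← ih]; rfl

lemma mixInv_eq_minv (X n : Int) : pvMixInv X n = pvMinv X n := by
  unfold pvMixInv pvMinv pvRevolve
  generalize (PySem.Int.floordiv n 2 - 1).toNat = r
  induction r generalizing X with
  | zero => rfl
  | succ r ih =>
    rw [List.range_succ, List.foldl_append, ih, revolveAux_succ]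
    simp only [List.foldl_cons, List.foldl_nil, mix_eq_fscx]

-- the update map of the fixed-point iteration, and the orbit it generates from A₀ = B ^ M_inv(Y)
def pvStep (Y B n mask A : Int) : Int :=
  PySem.Int.bxor B (pvMinv (PySem.Int.bxor Y (pvRol (PySem.Int.band (A + B) mask) (n >>> 2) n)) n)

def pvSeq (Y B n mask : Int) (t : Nat) : Int :=
  (pvStep Y B n mask)^[t] (PySem.Int.bxor B (pvMinv Y n))

lemma pvSeq_succ (Y B n mask : Int) (t : Nat) :
    pvSeq Y B n mask (t + 1) = pvStep Y B n mask (pvSeq Y B n mask t) := by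
  simp [pvSeq, Function.iterate_succ_apply']

lemma bstep_eq (Y B n mask A : Int) :
    PySem.Int.bxor B
      (pvMixInv (PySem.Int.bxor Y (pvRotl (PySem.Int.band (A + B) mask) (n >>> 2) n)) n)
    = pvStep Y B n mask A := by
  rw [mixInv_eq_minv, pvRotl_eq]; rfl

-- orbit periodicity: a repeat at indices j and j+L makes the orbit L-periodic from j on
lemma iter_period {α : Type} (f : α → α) (a : α) (j L : Nat) (_hL : 1 ≤ L)
    (hc : f^[j + L] a = f^[j] a) :
    ∀ t, j ≤ t → f^[t] a = f^[j + (t - j) % L] a := by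
  have hmul : ∀ d, f^[j + L * d] a = f^[j] a := by
    intro d
    induction d with
    | zero => simp
    | succ d ih =>
      have : j + L * (d+1) = L + (j + L * d) := by ring
      rw [this, Function.iterate_add_apply, ih, ← Function.iterate_add_apply]
      rw [Nat.add_comm L j, hc]
  intro t ht
  have hdm := Nat.div_add_mod (t - j) L
  have h1 : t = (t - j) % L + (j + L * ((t - j) / L)) := by omega
  conv_lhs => rw [h1]
  rw [Function.iterate_add_apply, hmul, ← Function.iterate_add_apply]
  congr 1
  omega

lemma succ_mod_ne {a L : Nat} (hL : 2 ≤ L) : (a + 1) % L ≠ a % L := by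
  have hd := Nat.div_add_mod a L
  have h2 : a % L < L := Nat.mod_lt _ (by omega)
  have h1 : (a + 1) % L = (a % L + 1) % L := by
    conv_lhs => rw [show a + 1 = a % L + 1 + L * (a / L) by omega]
    exact Nat.add_mul_mod_self_left _ _ _
  rcases Nat.lt_or_ge (a % L + 1) L with h | h
  · rw [h1, Nat.mod_eq_of_lt h]; omega
  · have : a % L + 1 = L := by omega
    rw [h1, this, Nat.mod_self]; omega

-- A's loop runs out its whole fuel when no consecutive repeat occurs
lemma aloop_run (Y B n mask : Int) :
    ∀ (k i : Nat), 1 ≤ i →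
    (∀ s : Nat, i ≤ s → s ≤ i - 1 + k → pvSeq Y B n mask s ≠ pvSeq Y B n mask (s - 1)) →
    pvALoop Y B n mask k (pvSeq Y B n mask (i - 1)) (i : Int)
      = (pvSeq Y B n mask (i - 1 + k), -1) := by
  intro k
  induction k with
  | zero => intro i hi _; simp [pvALoop]
  | succ k ih =>
    intro i hi hns
    have hstep : pvStep Y B n mask (pvSeq Y B n mask (i - 1)) = pvSeq Y B n mask i := by
      rw [← pvSeq_succ]; congr 1; omega
    have hne : pvSeq Y B n mask i ≠ pvSeq Y B n mask (i - 1) := by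
      have := hns i (le_refl _) (by omega)
      simpa using this
    show (if pvStep Y B n mask (pvSeq Y B n mask (i-1)) = pvSeq Y B n mask (i-1) then _ else
        pvALoop Y B n mask k (pvStep Y B n mask (pvSeq Y B n mask (i-1))) ((i : Int) + 1)) = _
    rw [hstep, if_neg hne]
    have h1 : ((i : Int) + 1) = ((i + 1 : Nat) : Int) := by push_cast; ring
    have h2 : pvSeq Y B n mask i = pvSeq Y B n mask ((i + 1) - 1) := by congr 1
    rw [h1, h2, ih (i+1) (by omega) (by intro s hs1 hs2; exact hns s (by omega) (by omega))]
    congr 2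
    omega

-- the main simulation: B's memoized loop returns exactly what A's loop returns
lemma bloop_eq_aloop (Y B n mask max_iter : Int) (M : Nat) (hM : max_iter = (M : Int)) :
    ∀ (k : Nat) (i : Nat) (pos : PySem.Dict Int Int) (trace : List Int), 1 ≤ i →
    i - 1 + k = M →
    trace = (List.range i).map (pvSeq Y B n mask) →
    (∀ (x : Int) (j : Int), pos.get? x = some j ↔
        ∃ t : Nat, t < i ∧ j = (t : Int) ∧ pvSeq Y B n mask t = x) →
    pvBLoop Y B n mask max_iter k (pvSeq Y B n mask (i - 1)) (i : Int) pos trace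
      = pvALoop Y B n mask k (pvSeq Y B n mask (i - 1)) (i : Int) := by
  intro k
  induction k with
  | zero => intro i pos trace _ _ _ _; simp [pvBLoop, pvALoop]
  | succ k ih =>
    intro i pos trace hi hfuel htrace hpos
    have hstep : pvStep Y B n mask (pvSeq Y B n mask (i - 1)) = pvSeq Y B n mask i := by
      rw [← pvSeq_succ]; congr 1; omega
    have hinj : ∀ t t' : Nat, t < i → t' < i →
        pvSeq Y B n mask t = pvSeq Y B n mask t' → t = t' := by
      intro t t' ht ht' hv
      have h1 : pos.get? (pvSeq Y B n mask t') = some (t : Int) :=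
        (hpos _ _).mpr ⟨t, ht, rfl, hv⟩
      have h2 : pos.get? (pvSeq Y B n mask t') = some (t' : Int) :=
        (hpos _ _).mpr ⟨t', ht', rfl, rfl⟩
      rw [h1] at h2
      exact_mod_cast Option.some.inj h2
    have hstepA : PySem.Int.bxor B
        (pvMinv (PySem.Int.bxor Y
          (pvRol (PySem.Int.band (pvSeq Y B n mask (i - 1) + B) mask) (n >>> 2) n)) n)
        = pvSeq Y B n mask i := hstep
    have hstepB : PySem.Int.bxor B
        (pvMixInv (PySem.Int.bxor Y
          (pvRotl (PySem.Int.band (pvSeq Y B n mask (i - 1) + B) mask) (n >>> 2) n)) n)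
        = pvSeq Y B n mask i := by rw [bstep_eq]; exact hstep
    simp only [pvBLoop, pvALoop]
    rw [hstepA, hstepB]
    by_cases hfix : pvSeq Y B n mask i = pvSeq Y B n mask (i - 1)
    · rw [if_pos hfix, if_pos hfix]
    · rw [if_neg hfix, if_neg hfix]
      rcases hget : pos.get? (pvSeq Y B n mask i) with _ | j
      all_goals dsimp only
      · -- unseen state: recurse, invariants extended
        have h1 : ((i : Int) + 1) = ((i + 1 : Nat) : Int) := by push_cast; ring
        rw [h1]
        have hih := ih (i+1) (pos.insert (pvSeq Y B n mask i) (i : Int))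
          (trace ++ [pvSeq Y B n mask i]) (by omega) (by omega)
          (by rw [htrace, List.range_succ, List.map_append]; simp)
          (by
            intro x j
            rw [PySem.Dict.get?_insert]
            constructor
            · intro hsome
              by_cases hx : x = pvSeq Y B n mask i
              · rw [if_pos hx] at hsome
                exact ⟨i, by omega, (Option.some.inj hsome).symm, hx.symm⟩
              · rw [if_neg hx] at hsome
                obtain ⟨t, ht, hj, hv⟩ := (hpos _ _).mp hsome
                exact ⟨t, by omega, hj, hv⟩
            · rintro ⟨t, ht, hj, hv⟩
              by_cases hx : x = pvSeq Y B n mask i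
              · rw [if_pos hx]
                have hti : t = i := by
                  rcases Nat.lt_or_ge t i with h | h
                  · exfalso
                    have hcontra : pos.get? (pvSeq Y B n mask i) = some (t : Int) :=
                      (hpos _ _).mpr ⟨t, h, rfl, hv.trans hx⟩
                    rw [hget] at hcontra; simp at hcontra
                  · omega
                rw [hj, hti]
              · rw [if_neg hx]
                have ht' : t < i := by
                  rcases Nat.lt_or_ge t i with h | h
                  · exact h
                  · exfalso
                    have hti : t = i := by omega
                    exact hx (by rw [← hv, hti])
                exact (hpos _ _).mpr ⟨t, ht', hj, hv⟩)
        have h2 : pvSeq Y B n mask ((i+1) - 1) = pvSeq Y B n mask i := by congr 1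
        rw [h2] at hih
        exact hih
      · -- repeated state: the orbit is periodic; compare with A's full run
        obtain ⟨t0, ht0, hj, hv⟩ := (hpos _ _).mp hget
        have hL2 : t0 + 2 ≤ i := by
          rcases Nat.lt_or_ge t0 (i - 1) with h | h
          · omega
          · exfalso
            have hti : t0 = i - 1 := by omega
            exact hfix (by rw [← hv, hti])
        set L : Nat := i - t0 with hLdef
        have hcyc : pvSeq Y B n mask (t0 + L) = pvSeq Y B n mask t0 := by
          rw [show t0 + L = i by omega]; exact hv.symm
        have hper : ∀ t, t0 ≤ t →
            pvSeq Y B n mask t = pvSeq Y B n mask (t0 + (t - t0) % L) :=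
          iter_period (pvStep Y B n mask) (PySem.Int.bxor B (pvMinv Y n)) t0 L (by omega) hcyc
        -- A's side: no fixed point ever occurs in the cycle, so A runs out its fuel
        have hns : ∀ s : Nat, i + 1 ≤ s → s ≤ (i + 1) - 1 + k →
            pvSeq Y B n mask s ≠ pvSeq Y B n mask (s - 1) := by
          intro s hs1 _ heq
          have ha : pvSeq Y B n mask s = pvSeq Y B n mask (t0 + (s - t0) % L) :=
            hper s (by omega)
          have hb : pvSeq Y B n mask (s - 1) = pvSeq Y B n mask (t0 + (s - 1 - t0) % L) :=
            hper (s - 1) (by omega)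
          have hm1 : (s - t0) % L < L := Nat.mod_lt _ (by omega)
          have hm2 : (s - 1 - t0) % L < L := Nat.mod_lt _ (by omega)
          have heqi := hinj _ _ (by omega) (by omega) (ha.symm.trans (heq.trans hb))
          have hs' : s - t0 = (s - 1 - t0) + 1 := by omega
          have hmodeq : ((s - 1 - t0) + 1) % L = (s - 1 - t0) % L := by
            rw [← hs']; omega
          exact succ_mod_ne (by omega) hmodeq
        have hArun : pvALoop Y B n mask k (pvSeq Y B n mask i) ((i : Int) + 1)
            = (pvSeq Y B n mask M, -1) := by
          have h1 : ((i : Int) + 1) = ((i + 1 : Nat) : Int) := by push_cast; ring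
          rw [h1]
          have hr := aloop_run Y B n mask k (i+1) (by omega) hns
          have h2 : pvSeq Y B n mask ((i+1) - 1) = pvSeq Y B n mask i := by congr 1
          rw [h2] at hr
          rw [hr]
          congr 2
          omega
        rw [hArun]
        -- B's side: read the answer off the trace
        have hLpos : (0 : Int) < (i : Int) - j := by rw [hj]; omega
        have hmodc : PySem.Int.mod (max_iter - j) ((i : Int) - j)
            = (((M - t0) % L : Nat) : Int) := by
          rw [PySem.Int.mod_eq_emod_of_pos hLpos, hM, hj]
          rw [show (M : Int) - (t0 : Int) = ((M - t0 : Nat) : Int) by omega]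
          rw [show (i : Int) - (t0 : Int) = ((L : Nat) : Int) by omega]
          rw [← Int.natCast_emod]
        have hidx : j + PySem.Int.mod (max_iter - j) ((i : Int) - j)
            = ((t0 + (M - t0) % L : Nat) : Int) := by
          rw [hmodc, hj]; push_cast; ring
        rw [hidx]
        have hidxlt : t0 + (M - t0) % L < i := by
          have := Nat.mod_lt (M - t0) (y := L) (by omega); omega
        have hgetE : PySem.List.pyGet? trace ((t0 + (M - t0) % L : Nat) : Int)
            = some (pvSeq Y B n mask (t0 + (M - t0) % L)) := by
          rw [PySem.List.pyGet?_natCast, htrace, List.getElem?_map, List.getElem?_range hidxlt]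
          rfl
        rw [hgetE]
        have hfin : pvSeq Y B n mask M = pvSeq Y B n mask (t0 + (M - t0) % L) :=
          hper M (by omega)
        simp [hfin]

-- ===== VERDICT (by name: the statement is the Claim_ definition above) =====
theorem nl_fscx_inv_iter_spec : Claim_equal_nl_fscx_inv_iter := by
  intro Y B max_iter n _ _
  unfold Spec_nl_fscx_inv_iter nl_fscx_inv_iter nl_fscx_inv_iter_alt
  rw [mixInv_eq_minv]
  rcases Int.lt_or_le max_iter 1 with hlt | hge
  · have h0 : max_iter.toNat = 0 := by omega
    rw [h0]
    rfl
  · have hM : max_iter = ((max_iter.toNat : Nat) : Int) := by omega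
    have htr : [PySem.Int.bxor B (pvMinv Y n)]
        = List.map (pvSeq Y B n ((1 <<< n.toNat : Int) - 1)) (List.range 1) := by
      simp [pvSeq]
    have hps : ∀ (x j : Int),
        (PySem.Dict.empty.insert (PySem.Int.bxor B (pvMinv Y n)) 0).get? x = some j ↔
        ∃ t : Nat, t < 1 ∧ j = (t : Int) ∧
          pvSeq Y B n ((1 <<< n.toNat : Int) - 1) t = x := by
      intro x j
      rw [PySem.Dict.get?_insert]
      constructor
      · intro hsome
        by_cases hx : x = PySem.Int.bxor B (pvMinv Y n)
        · rw [if_pos hx] at hsome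
          refine ⟨0, by omega, ?_, ?_⟩
          · simpa using (Option.some.inj hsome).symm
          · rw [hx]; rfl
        · rw [if_neg hx] at hsome
          simp at hsome
      · rintro ⟨t, ht, hj, hv⟩
        have ht0 : t = 0 := by omega
        subst ht0
        have hx : x = PySem.Int.bxor B (pvMinv Y n) := by rw [← hv]; rfl
        rw [if_pos hx, hj]
        norm_num
    have key := bloop_eq_aloop Y B n ((1 <<< n.toNat : Int) - 1) max_iter max_iter.toNat hM
      max_iter.toNat 1 (PySem.Dict.empty.insert (PySem.Int.bxor B (pvMinv Y n)) 0)
      [PySem.Int.bxor B (pvMinv Y n)] (by omega) (by omega) htr hps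
    exact key.symm
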